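-- pv_equiv track=rewrite | github.com/Twodragon0/tech-blog | scripts/upgrade_weekly_digest_korean.py | first_text_block
-- ===== SOURCE A (Python) =====
-- def first_text_block(sec_lines):
--     buf = []
--     for ln in sec_lines:
--         s = ln.strip()
--         if not s:
--             if buf:
--                 break
--             continue
--         if (
--             s.startswith(">")
--             or s.startswith("####")
--             or s.startswith("**핵심 포인트")
--             or s.startswith("-")
--         ):
--             if buf:
--                 break
--             continue
--         if s.startswith("```"):
--             break
--         buf.append(s)
--     return " ".join(buf)
-- ===== SOURCE B (Python) =====
-- def first_text_block(sec_lines):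
--     def skip(s):
--         return not s or s.startswith((">", "####", "**핵심 포인트", "-"))
--     stripped = [ln.strip() for ln in sec_lines]
--     rest = stripped
--     while rest and skip(rest[0]):
--         rest = rest[1:]
--     body = []
--     for s in rest:
--         if skip(s) or s.startswith("```"):
--             break
--         body.append(s)
--     return " ".join(body)
-- ===== Notes on version B (the rewrite author's own statement) =====
-- stated objective: simpler
-- what changed: Replaces A's single stateful buf-loop (whose break/continue behaviour depends on whether buf is non-empty) with two stateless phases: strip all lines, drop the leading run of empty/decorative lines, then take the maximal run of plain text lines stopping at any empty/decorative/fence line.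
import Mathlib
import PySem

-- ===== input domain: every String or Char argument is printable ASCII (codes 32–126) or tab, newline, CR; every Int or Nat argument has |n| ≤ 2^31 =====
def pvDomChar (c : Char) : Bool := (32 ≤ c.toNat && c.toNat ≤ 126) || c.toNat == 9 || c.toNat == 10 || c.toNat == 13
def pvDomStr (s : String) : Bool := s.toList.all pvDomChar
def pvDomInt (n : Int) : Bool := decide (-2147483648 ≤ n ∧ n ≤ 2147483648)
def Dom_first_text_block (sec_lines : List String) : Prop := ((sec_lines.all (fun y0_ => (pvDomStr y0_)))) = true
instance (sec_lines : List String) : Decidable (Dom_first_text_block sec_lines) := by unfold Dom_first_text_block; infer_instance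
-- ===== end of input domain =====

-- B replaces A's single stateful buf-loop with two stateless phases (drop leading
-- empty/decorative lines, then take the plain-text run); same result, simpler shape.


-- ===== PORT A =====
-- A's decorative-prefix condition, in A's order.
def pvDecoA (s : String) : Bool :=
  PySem.Str.startswith s ">" || PySem.Str.startswith s "####" ||
  PySem.Str.startswith s "**핵심 포인트" || PySem.Str.startswith s "-"

-- A's loop: buf accumulator, break/continue depending on whether buf is non-empty.
def pvGoA : List String → List String → List String
  | buf, [] => buf
  | buf, ln :: rest =>
    let s := PySem.Str.strip ln
    if s = "" then (if buf ≠ [] then buf else pvGoA buf rest)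
    else if pvDecoA s then (if buf ≠ [] then buf else pvGoA buf rest)
    else if PySem.Str.startswith s "```" then buf
    else pvGoA (buf ++ [s]) rest

def first_text_block (sec_lines : List String) : String :=
  PySem.Str.join " " (pvGoA [] sec_lines)

-- ===== PORT B =====
-- Source B's skip predicate: empty or decorative.
def pvSkipB (s : String) : Bool :=
  s = "" || PySem.Str.startswith s ">" || PySem.Str.startswith s "####" ||
  PySem.Str.startswith s "**핵심 포인트" || PySem.Str.startswith s "-"

-- Source B's while loop: drop the leading run of skip-lines.
def pvDropB : List String → List String
  | [] => []
  | s :: rest => if pvSkipB s then pvDropB rest else s :: rest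

-- Source B's for loop with break: take the plain-text run.
def pvTakeB : List String → List String
  | [] => []
  | s :: rest =>
    if pvSkipB s || PySem.Str.startswith s "```" then []
    else s :: pvTakeB rest

def first_text_block_alt (sec_lines : List String) : String :=
  PySem.Str.join " " (pvTakeB (pvDropB (sec_lines.map PySem.Str.strip)))

-- ===== PRECONDITION & SPEC =====
def Spec_first_text_block (sec_lines : List String) (out : String) : Prop := out = first_text_block_alt sec_lines
instance (sec_lines : List String) (out : String) : Decidable (Spec_first_text_block sec_lines out) := by unfold Spec_first_text_block; infer_instance

-- ===== CLAIM (what is proved, stated in full; the proofs are below) =====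
def Claim_equal_first_text_block : Prop := ∀ (sec_lines : List String), Dom_first_text_block sec_lines → Spec_first_text_block sec_lines (first_text_block sec_lines)

-- ===== LEMMAS AND PROOFS =====

-- B's skip predicate is "empty or A's decorative condition".
theorem pvSkipB_eq (s : String) : pvSkipB s = (decide (s = "") || pvDecoA s) := by
  simp [pvSkipB, pvDecoA, Bool.or_assoc]

-- Once buf is non-empty, A's loop stops at any empty/decorative/fence stripped line,
-- i.e. it appends exactly B's take-run.
theorem pvGoA_nonempty (rest : List String) :
    ∀ buf : List String, buf ≠ [] →
      pvGoA buf rest = buf ++ pvTakeB (rest.map PySem.Str.strip) := by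
  induction rest with
  | nil => intro buf _; simp [pvGoA, pvTakeB]
  | cons ln rest ih =>
    intro buf hbuf
    simp only [pvGoA, List.map_cons, pvTakeB, pvSkipB_eq]
    by_cases h0 : PySem.Str.strip ln = ""
    · simp [h0, hbuf]
    · cases hd : pvDecoA (PySem.Str.strip ln)
      · cases hf : PySem.Str.startswith (PySem.Str.strip ln) "```"
        · simp [h0]
          rw [ih (buf ++ [PySem.Str.strip ln]) (by simp)]
          simp
        · simp [h0]
      · simp [h0, hbuf]

-- While buf is empty, A skips exactly B's drop-run and then behaves as the take-run.
theorem pvGoA_empty (sec_lines : List String) :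
    pvGoA [] sec_lines = pvTakeB (pvDropB (sec_lines.map PySem.Str.strip)) := by
  induction sec_lines with
  | nil => simp [pvGoA, pvDropB, pvTakeB]
  | cons ln rest ih =>
    simp only [pvGoA, List.map_cons, pvDropB, pvSkipB_eq]
    by_cases h0 : PySem.Str.strip ln = ""
    · simp [h0, ih]
    · cases hd : pvDecoA (PySem.Str.strip ln)
      · cases hf : PySem.Str.startswith (PySem.Str.strip ln) "```" <;> simp at hf
        · simp [h0, hd, hf, pvTakeB, pvSkipB_eq]
          rw [pvGoA_nonempty rest [PySem.Str.strip ln] (by simp)]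
          simp
        · simp [h0, hd, hf, pvTakeB, pvSkipB_eq]
      · simp [h0, ih]

-- ===== VERDICT (by name: the statement is the Claim_ definition above) =====
theorem first_text_block_spec : Claim_equal_first_text_block := by
  intro sec_lines _
  unfold Spec_first_text_block first_text_block first_text_block_alt
  rw [pvGoA_empty]
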